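-- pv_equiv track=rewrite | github.com/reschandreas/AdventOfCode | 2024/07/main.py | is_correct_order
-- ===== SOURCE A (Python) =====
-- from typing import List
--
-- def is_correct_order(result: int, parts: List[int], operators: List[str], acc: int) -> bool:
--     if len(parts) == 0:
--         return result == acc
--     operator: str = operators.pop(0)
--     tmp: int = parts.pop(0)
--     if operator == '*':
--         tmp *= acc
--     if operator == '+':
--         tmp += acc
--     if tmp > result:
--         return False
--     return is_correct_order(result, parts, operators, tmp)
-- ===== SOURCE B (Python) =====
-- def is_correct_order(result, parts, operators, acc):
--     # Return-value equivalence only: unlike A, this does not consume the lists.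
--     accs = []
--     for op, p in zip(operators, parts):
--         acc = p * acc if op == '*' else p + acc if op == '+' else p
--         accs.append(acc)
--     return acc == result and all(v <= result for v in accs)
-- ===== Notes on version B (the rewrite author's own statement) =====
-- stated objective: alternative
-- what changed: Replaces the early-exit tail recursion that pops the head of both lists at every step by a single non-mutating pass over zip(operators, parts) that records every intermediate accumulator and then checks 'final equals result and no intermediate exceeds result'.
-- outside the precondition, e.g. on is_correct_order(0, [1, 2], ['+'], 5): A returns False, B returns False
import Mathlib
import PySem

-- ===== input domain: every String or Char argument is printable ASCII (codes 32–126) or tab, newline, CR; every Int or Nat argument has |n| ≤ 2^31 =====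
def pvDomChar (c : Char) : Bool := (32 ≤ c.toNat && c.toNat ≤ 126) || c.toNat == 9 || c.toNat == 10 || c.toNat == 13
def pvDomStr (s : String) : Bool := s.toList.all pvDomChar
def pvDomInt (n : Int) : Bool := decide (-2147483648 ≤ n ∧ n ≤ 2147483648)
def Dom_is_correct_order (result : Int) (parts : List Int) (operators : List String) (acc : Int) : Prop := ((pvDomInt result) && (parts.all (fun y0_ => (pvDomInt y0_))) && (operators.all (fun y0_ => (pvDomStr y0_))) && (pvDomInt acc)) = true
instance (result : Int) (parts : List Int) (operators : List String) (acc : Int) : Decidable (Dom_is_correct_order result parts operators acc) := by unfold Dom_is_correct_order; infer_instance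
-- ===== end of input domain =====

-- B evaluates every intermediate accumulator in one non-mutating pass over the zipped lists and
-- checks them afterwards, instead of A's early-exit tail recursion; return-value equivalence only
-- (A pops the consumed prefix from both argument lists, B does not mutate them).
-- ===== PORT A =====
def is_correct_order (result : Int) (parts : List Int) (operators : List String) (acc : Int) : Bool :=
  match parts, operators with
  | [], _ => result == acc
  | _p :: _, [] => false  -- Python raises IndexError here (operators.pop(0) on []); excluded by Pre_
  | p :: ps, op :: ops =>
    let tmp := p
    let tmp := if op == "*" then tmp * acc else tmp
    let tmp := if op == "+" then tmp + acc else tmp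
    if tmp > result then false
    else is_correct_order result ps ops tmp

-- ===== PORT B =====
def is_correct_order_alt (result : Int) (parts : List Int) (operators : List String) (acc : Int) : Bool :=
  let st := (List.zip operators parts).foldl
    (fun (st : List Int × Int) (opp : String × Int) =>
      let a := if opp.1 == "*" then opp.2 * st.2
               else if opp.1 == "+" then opp.2 + st.2
               else opp.2
      (st.1 ++ [a], a)) ([], acc)
  st.2 == result && st.1.all (fun v => decide (v ≤ result))

-- ===== PRECONDITION & SPEC =====
-- Pre_ requires at least as many operators as parts; with fewer, A raises IndexError unless an
-- early False exit fires first, a run-dependent condition with no closed form (B just truncates the zip).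
def Pre_is_correct_order (result : Int) (parts : List Int) (operators : List String) (acc : Int) : Prop :=
  parts.length ≤ operators.length
instance (result : Int) (parts : List Int) (operators : List String) (acc : Int) : Decidable (Pre_is_correct_order result parts operators acc) := by unfold Pre_is_correct_order; infer_instance
def pvWitness_is_correct_order : Int × List Int × List String × Int := (6, [2, 3], ["+", "*"], 1)
def Spec_is_correct_order (result : Int) (parts : List Int) (operators : List String) (acc : Int) (out : Bool) : Prop := out = is_correct_order_alt result parts operators acc
instance (result : Int) (parts : List Int) (operators : List String) (acc : Int) (out : Bool) : Decidable (Spec_is_correct_order result parts operators acc out) := by unfold Spec_is_correct_order; infer_instance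

-- ===== CLAIM (what is proved, stated in full; the proofs are below) =====
def Claim_equal_is_correct_order : Prop := ∀ (result : Int) (parts : List Int) (operators : List String) (acc : Int), Dom_is_correct_order result parts operators acc → Pre_is_correct_order result parts operators acc → Spec_is_correct_order result parts operators acc (is_correct_order result parts operators acc)

-- ===== LEMMAS AND PROOFS =====

-- proof-only intermediate: "every intermediate value stays ≤ result and the last equals result",
-- written as a recursion over the zipped (operator, part) pairs
def gB (result : Int) : List (String × Int) → Int → Bool
  | [], acc => acc == result
  | (op, p) :: rest, acc =>
    let a := if op == "*" then p * acc else if op == "+" then p + acc else p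
    decide (a ≤ result) && gB result rest a

theorem ite_gt (result X : Int) (b : Bool) :
    (if X > result then false else b) = (decide (X ≤ result) && b) := by
  by_cases h : X > result
  · have : decide (X ≤ result) = false := by simp; omega
    simp [h, this]
  · have : decide (X ≤ result) = true := by simp; omega
    simp [h, this]

-- B's fold, generalized over the already-accumulated prefix l0, computes gB
theorem fold_char (result : Int) :
    ∀ (pairs : List (String × Int)) (acc : Int) (l0 : List Int),
      ((pairs.foldl
        (fun (st : List Int × Int) (opp : String × Int) =>
          let a := if opp.1 == "*" then opp.2 * st.2
                   else if opp.1 == "+" then opp.2 + st.2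
                   else opp.2
          (st.1 ++ [a], a)) (l0, acc)).2 == result
       && (pairs.foldl
        (fun (st : List Int × Int) (opp : String × Int) =>
          let a := if opp.1 == "*" then opp.2 * st.2
                   else if opp.1 == "+" then opp.2 + st.2
                   else opp.2
          (st.1 ++ [a], a)) (l0, acc)).1.all (fun v => decide (v ≤ result)))
      = (l0.all (fun v => decide (v ≤ result)) && gB result pairs acc) := by
  intro pairs
  induction pairs with
  | nil =>
    intro acc l0
    simp [gB, Bool.and_comm]
  | cons opp rest ih =>
    intro acc l0
    obtain ⟨op, p⟩ := opp
    simp only [List.foldl_cons, gB]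
    rw [ih]
    simp [List.all_append, Bool.and_assoc, Bool.and_left_comm]

-- A (when it cannot run out of operators) computes gB over the zipped lists
theorem a_char (result : Int) :
    ∀ (parts : List Int) (operators : List String) (acc : Int),
      parts.length ≤ operators.length →
      is_correct_order result parts operators acc = gB result (List.zip operators parts) acc := by
  intro parts
  induction parts with
  | nil =>
    intro operators acc _
    simp only [List.zip_nil_right, is_correct_order, gB]
    by_cases h : result = acc
    · simp [h]
    · simp [h, Ne.symm h]
  | cons p ps ih =>
    intro operators acc hlen
    cases operators with
    | nil => simp at hlen
    | cons op ops =>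
      have hlen' : ps.length ≤ ops.length := by simpa using hlen
      simp only [List.zip_cons_cons, is_correct_order, gB]
      rw [ih ops _ hlen']
      by_cases h1 : op = "*"
      · have t1 : (op == "*") = true := by simp [h1]
        have t2 : (op == "+") = false := by simp [h1]
        simp only [t1, t2, if_true, Bool.false_eq_true, if_false, ite_gt]
      · have t1 : (op == "*") = false := by simp [h1]
        rw [t1]
        by_cases h2 : op = "+"
        · have t2 : (op == "+") = true := by simp [h2]
          simp only [t2, if_true, Bool.false_eq_true, if_false, ite_gt]
        · have t2 : (op == "+") = false := by simp [h2]
          simp only [t2, Bool.false_eq_true, if_false, ite_gt]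

-- ===== VERDICT (by name: the statement is the Claim_ definition above) =====
theorem is_correct_order_spec : Claim_equal_is_correct_order := by
  intro result parts operators acc _ hpre
  unfold Spec_is_correct_order is_correct_order_alt
  simp only
  rw [fold_char, a_char result parts operators acc hpre]
  simp
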